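-- pv_equiv track=rewrite | github.com/0mu2004/Personal_Finance_Management_ | backend/ocr.py | _extract_vendor
-- ===== SOURCE A (Python) =====
-- def _extract_vendor(text: str) -> str:
--     """Extract vendor/store name from bill text."""
--     lines = text.split('\n')
--
--     # First line is often the vendor name
--     for line in lines[:10]:
--         line = line.strip()
--         if len(line) > 3 and len(line) < 100:
--             # Look for business indicators
--             if any(keyword in line.lower() for keyword in ['store', 'restaurant', 'cafe', 'shop', 'hotel', 'inn', 'inc', 'corp']):
--                 return line
--
--     # Fallback: use first non-empty line
--     for line in lines:
--         line = line.strip()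
--         if line and len(line) > 3:
--             return line[:50]  # Limit length
--
--     return "Bill"
-- ===== SOURCE B (Python) =====
-- def _extract_vendor(text: str) -> str:
--     """Extract vendor/store name from bill text (single fused pass)."""
--     keywords = ('store', 'restaurant', 'cafe', 'shop', 'hotel', 'inn', 'inc', 'corp')
--     fallback = None
--     for i, raw in enumerate(text.split('\n')):
--         line = raw.strip()
--         if i < 10 and 3 < len(line) < 100 and any(k in line.lower() for k in keywords):
--             return line
--         if fallback is None and line and len(line) > 3:
--             fallback = line[:50]
--     return fallback if fallback is not None else "Bill"
-- ===== Notes on version B (the rewrite author's own statement) =====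
-- stated objective: alternative
-- what changed: Fused A's two sequential scans over the lines into one indexed pass that returns a keyword line at once and records the first long non-empty line as a never-overwritten fallback.
import Mathlib
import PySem

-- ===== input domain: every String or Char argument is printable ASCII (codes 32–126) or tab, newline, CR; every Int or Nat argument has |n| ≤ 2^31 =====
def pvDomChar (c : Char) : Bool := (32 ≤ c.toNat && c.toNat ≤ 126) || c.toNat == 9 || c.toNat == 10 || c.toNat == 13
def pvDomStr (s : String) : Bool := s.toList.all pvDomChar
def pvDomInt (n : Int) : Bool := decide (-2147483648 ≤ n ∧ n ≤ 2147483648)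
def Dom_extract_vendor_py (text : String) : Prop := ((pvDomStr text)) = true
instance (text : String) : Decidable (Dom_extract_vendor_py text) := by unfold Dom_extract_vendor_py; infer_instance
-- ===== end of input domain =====

-- B fuses A's two scans into one indexed pass with a never-overwritten fallback (objective: alternative decomposition, same cost).

-- ===== PORT A =====
def pvKeywords : List String := ["store", "restaurant", "cafe", "shop", "hotel", "inn", "inc", "corp"]

def pvHasKw (line : String) : Bool :=
  pvKeywords.any (fun k => PySem.Str.isIn k (PySem.Str.lower line))

-- first for-loop of A: over lines[:10], return the first keyword line
def pvALoop1 : List String → Option String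
  | [] => none
  | l :: ls =>
    let line := PySem.Str.strip l
    if PySem.Str.len line > 3 ∧ PySem.Str.len line < 100 ∧ pvHasKw line = true then some line
    else pvALoop1 ls

-- second for-loop of A: first non-empty line with len > 3, truncated to 50 chars
def pvALoop2 : List String → String
  | [] => "Bill"
  | l :: ls =>
    let line := PySem.Str.strip l
    if line ≠ "" ∧ PySem.Str.len line > 3 then PySem.Str.slice line none (some 50)
    else pvALoop2 ls

def extract_vendor_py (text : String) : String :=
  let lines := (PySem.Str.split? text "\n").getD []  -- sep = "\n" ≠ "", so split? is always some
  match pvALoop1 (PySem.List.slice lines none (some 10)) with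
  | some line => line
  | none => pvALoop2 lines

-- ===== PORT B =====
-- single fused pass of Source B: i is the enumerate index, fb the stored fallback
def pvBGo : List String → Nat → Option String → String
  | [], _, fb => fb.getD "Bill"
  | l :: ls, i, fb =>
    let line := PySem.Str.strip l
    if i < 10 ∧ PySem.Str.len line > 3 ∧ PySem.Str.len line < 100 ∧ pvHasKw line = true then line
    else
      pvBGo ls (i + 1)
        (if fb = none ∧ line ≠ "" ∧ PySem.Str.len line > 3 then
           some (PySem.Str.slice line none (some 50))
         else fb)

def extract_vendor_py_alt (text : String) : String :=
  let lines := (PySem.Str.split? text "\n").getD []  -- sep = "\n" ≠ "", so split? is always some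
  pvBGo lines 0 none

-- ===== PRECONDITION & SPEC =====
def Spec_extract_vendor_py (text : String) (out : String) : Prop := out = extract_vendor_py_alt text
instance (text : String) (out : String) : Decidable (Spec_extract_vendor_py text out) := by unfold Spec_extract_vendor_py; infer_instance

-- ===== CLAIM (what is proved, stated in full; the proofs are below) =====
def Claim_equal_extract_vendor_py : Prop := ∀ (text : String), Dom_extract_vendor_py text → Spec_extract_vendor_py text (extract_vendor_py text)

-- ===== LEMMAS AND PROOFS =====

-- loop-fusion invariant: the fused pass equals keyword-scan over the remaining budget, else the stored/first fallback
set_option maxHeartbeats 1000000 in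
theorem pvBGo_eq (ls : List String) : ∀ (i : Nat) (fb : Option String),
    pvBGo ls i fb =
      match pvALoop1 (ls.take (10 - i)) with
      | some line => line
      | none => fb.getD (pvALoop2 ls) := by
  induction ls with
  | nil => intro i fb; cases fb <;> simp [pvBGo, pvALoop1, pvALoop2]
  | cons l ls ih =>
    intro i fb
    simp only [pvBGo]
    by_cases hi : i < 10
    · have htake : (l :: ls).take (10 - i) = l :: ls.take (10 - (i + 1)) := by
        have h : 10 - i = (10 - (i + 1)) + 1 := by omega
        simp [h]
      rw [htake]
      simp only [pvALoop1]
      by_cases hkw : PySem.Str.len (PySem.Str.strip l) > 3 ∧ PySem.Str.len (PySem.Str.strip l) < 100 ∧ pvHasKw (PySem.Str.strip l) = true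
      · rw [if_pos ⟨hi, hkw⟩, if_pos hkw]
      · rw [if_neg (fun h => hkw h.2), if_neg hkw, ih]
        cases h1 : pvALoop1 (ls.take (10 - (i + 1))) with
        | some s => rfl
        | none =>
          cases fb with
          | some x => rfl
          | none =>
            simp only [pvALoop2]
            by_cases hf : PySem.Str.strip l ≠ "" ∧ PySem.Str.len (PySem.Str.strip l) > 3
            · rw [if_pos (⟨by simp, hf⟩ : _ ∧ _), if_pos hf]; rfl
            · rw [if_neg (fun h => hf h.2), if_neg hf]
    · have htake : (l :: ls).take (10 - i) = [] := by
        have h : 10 - i = 0 := by omega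
        simp [h]
      have htake' : ls.take (10 - (i + 1)) = [] := by
        have h : 10 - (i + 1) = 0 := by omega
        simp [h]
      rw [htake]
      simp only [pvALoop1]
      rw [if_neg (fun h => hi h.1), ih, htake']
      simp only [pvALoop1]
      cases fb with
      | some x => rfl
      | none =>
        simp only [pvALoop2]
        by_cases hf : PySem.Str.strip l ≠ "" ∧ PySem.Str.len (PySem.Str.strip l) > 3
        · rw [if_pos (⟨by simp, hf⟩ : _ ∧ _), if_pos hf]; rfl
        · rw [if_neg (fun h => hf h.2), if_neg hf]

-- ===== VERDICT (by name: the statement is the Claim_ definition above) =====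
theorem extract_vendor_py_spec : Claim_equal_extract_vendor_py := by
  intro text _
  unfold Spec_extract_vendor_py extract_vendor_py extract_vendor_py_alt
  rw [pvBGo_eq]
  simp [PySem.List.slice_to]
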